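-- pv_equiv track=rewrite | github.com/nirfer13/HorusBot | functions/functions_twitch.py | _roles_to_remove
-- ===== SOURCE A (Python) =====
-- from typing import Dict, List, Tuple, Optional
--
-- def _roles_to_remove(keep_role_id: int, tier_role_ids: List[int]) -> List[int]:
--     r = [rid for rid in tier_role_ids if rid]
--     if keep_role_id in r:
--         try:
--             r.remove(keep_role_id)
--         except ValueError:
--             pass
--     return r
-- ===== SOURCE B (Python) =====
-- from typing import List
--
-- def _roles_to_remove(keep_role_id: int, tier_role_ids: List[int]) -> List[int]:
--     result = []
--     removed = False
--     for rid in tier_role_ids: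
--         if not rid:
--             continue
--         if not removed and rid == keep_role_id:
--             removed = True
--             continue
--         result.append(rid)
--     return result
-- ===== Notes on version B (the rewrite author's own statement) =====
-- stated objective: simpler
-- what changed: Replaces A's filter-comprehension plus membership test plus separate .remove() rescan with a single pass that skips falsy ids and skips exactly the first occurrence of keep_role_id via a once-flipped flag.
import Mathlib
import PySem

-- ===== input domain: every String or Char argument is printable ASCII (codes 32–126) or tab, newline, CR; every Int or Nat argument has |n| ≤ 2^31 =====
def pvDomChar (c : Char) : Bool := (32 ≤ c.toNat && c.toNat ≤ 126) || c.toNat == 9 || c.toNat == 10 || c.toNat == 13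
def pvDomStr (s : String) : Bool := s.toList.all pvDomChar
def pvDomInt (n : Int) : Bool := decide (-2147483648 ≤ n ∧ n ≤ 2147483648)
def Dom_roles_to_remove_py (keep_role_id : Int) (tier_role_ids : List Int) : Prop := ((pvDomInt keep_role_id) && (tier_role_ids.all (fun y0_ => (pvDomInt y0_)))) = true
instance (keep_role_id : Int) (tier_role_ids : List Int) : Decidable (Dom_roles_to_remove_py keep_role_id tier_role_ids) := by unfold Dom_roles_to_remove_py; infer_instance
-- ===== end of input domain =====

-- B fuses A's filter-comprehension and separate .remove() rescan into one pass with a once-flipped flag (objective: simpler).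

-- ===== PORT A =====
def roles_to_remove_py (keep_role_id : Int) (tier_role_ids : List Int) : List Int :=
  -- r = [rid for rid in tier_role_ids if rid]
  let r := tier_role_ids.filter (fun rid => rid ≠ 0)
  -- if keep_role_id in r: try r.remove(keep_role_id) except ValueError: pass
  if keep_role_id ∈ r then
    match PySem.List.remove? r keep_role_id with
    | some r' => r'
    | none => r          -- ValueError: pass (unreachable under the membership guard)
  else r

-- ===== PORT B =====
-- one pass over tier_role_ids with a 'removed' flag flipped at the first matching id
def rtrLoop (keep_role_id : Int) : List Int → Bool → List Int
  | [], _ => []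
  | rid :: rest, removed =>
    if rid = 0 then rtrLoop keep_role_id rest removed
    else if ¬removed ∧ rid = keep_role_id then rtrLoop keep_role_id rest true
    else rid :: rtrLoop keep_role_id rest removed

def roles_to_remove_py_alt (keep_role_id : Int) (tier_role_ids : List Int) : List Int :=
  rtrLoop keep_role_id tier_role_ids false

-- ===== PRECONDITION & SPEC =====
def Spec_roles_to_remove_py (keep_role_id : Int) (tier_role_ids : List Int) (out : List Int) : Prop := out = roles_to_remove_py_alt keep_role_id tier_role_ids
instance (keep_role_id : Int) (tier_role_ids : List Int) (out : List Int) : Decidable (Spec_roles_to_remove_py keep_role_id tier_role_ids out) := by unfold Spec_roles_to_remove_py; infer_instance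

-- ===== CLAIM (what is proved, stated in full; the proofs are below) =====
def Claim_equal_roles_to_remove_py : Prop := ∀ (keep_role_id : Int) (tier_role_ids : List Int), Dom_roles_to_remove_py keep_role_id tier_role_ids → Spec_roles_to_remove_py keep_role_id tier_role_ids (roles_to_remove_py keep_role_id tier_role_ids)

-- ===== LEMMAS AND PROOFS =====

theorem rtrLoop_true (k : Int) (xs : List Int) :
    rtrLoop k xs true = xs.filter (fun rid => rid ≠ 0) := by
  induction xs with
  | nil => simp [rtrLoop]
  | cons x rest ih =>
    by_cases hx : x = 0 <;> simp [rtrLoop, hx, ih]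

theorem rtrLoop_false (k : Int) (xs : List Int) :
    rtrLoop k xs false =
      if k ∈ xs.filter (fun rid => rid ≠ 0) then (xs.filter (fun rid => rid ≠ 0)).erase k
      else xs.filter (fun rid => rid ≠ 0) := by
  induction xs with
  | nil => simp [rtrLoop]
  | cons x rest ih =>
    by_cases hx : x = 0
    · simpa [rtrLoop, hx, List.filter_cons] using ih
    · by_cases hk : x = k
      · subst hk
        simp [rtrLoop, hx, rtrLoop_true, List.erase_cons_head]
      · have hfc : (x :: rest).filter (fun rid => rid ≠ 0) =
            x :: rest.filter (fun rid => rid ≠ 0) := by simp [hx]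
        have hkx : k ≠ x := fun h => hk h.symm
        by_cases hmem : k ∈ rest.filter (fun rid => rid ≠ 0)
        · have : k ∈ (x :: rest).filter (fun rid => rid ≠ 0) := by
            rw [hfc]; exact List.mem_cons_of_mem _ hmem
          rw [show rtrLoop k (x :: rest) false = x :: rtrLoop k rest false by
                simp [rtrLoop, hx, hk],
              ih, if_pos hmem, if_pos this, hfc, List.erase_cons_tail]
          simpa using hk
        · have : k ∉ (x :: rest).filter (fun rid => rid ≠ 0) := by
            rw [hfc]; intro h; rcases List.mem_cons.mp h with h | h
            exacts [hkx h, hmem h]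
          rw [show rtrLoop k (x :: rest) false = x :: rtrLoop k rest false by
                simp [rtrLoop, hx, hk],
              ih, if_neg hmem, if_neg this, hfc]

-- ===== VERDICT (by name: the statement is the Claim_ definition above) =====
theorem roles_to_remove_py_spec : Claim_equal_roles_to_remove_py := by
  intro k xs _
  unfold Spec_roles_to_remove_py roles_to_remove_py roles_to_remove_py_alt
  rw [rtrLoop_false]
  by_cases hmem : k ∈ xs.filter (fun rid => rid ≠ 0)
  · rw [if_pos hmem, if_pos hmem, PySem.List.remove?_eq_some_erase _ _ hmem]
  · rw [if_neg hmem, if_neg hmem]
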